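-- pv_equiv track=rewrite | github.com/SgtSteiner/DataMining | classification_OneR.py | train_feature_value
-- ===== SOURCE A (Python) =====
-- from collections import defaultdict
-- from operator import itemgetter
--
-- def train_feature_value(x, y_true, feature, value):
--     # Crea un diccionario para contar con qué frecuencia se dan determinadas predicciones
--     class_counts = defaultdict(int)
--
--     # Se itera a través de cada muestra y se cuenta la frecuencia de cada par clase/valor
--     for sample, y in zip(x, y_true):
--         if sample[feature] == value:
--             class_counts[y] += 1
--
--     # Se obtiene la mejor ordenándola (la mayor primero) y eligiendo el primer item
--     sorted_class_counts = sorted(class_counts.items(), key=itemgetter(1), reverse=True)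
--     most_frequent_class = sorted_class_counts[0][0]
--
--     # El error es el número de muestras que no se clasifican como la clase más frecuente
--     # *y* tienen el valor de la característica
--     error = sum([class_count for class_value, class_count in class_counts.items()
--                  if class_value != most_frequent_class])
--     return most_frequent_class, error
-- ===== SOURCE B (Python) =====
-- from collections import defaultdict
--
--
-- def train_feature_value(x, y_true, feature, value):
--     # Same one-pass count of classes among samples whose feature equals value.
--     class_counts = defaultdict(int)
--     for sample, y in zip(x, y_true):
--         if sample[feature] == value:
--             class_counts[y] += 1
--
--     # Linear first-max scan instead of a full sort: strict '>' keeps the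
--     # first-inserted class on ties, exactly like the stable reverse sort.
--     items = list(class_counts.items())
--     best = items[0]  # IndexError on empty, as in the original
--     for it in items[1:]:
--         if it[1] > best[1]:
--             best = it
--
--     # error = all counted samples minus those of the most frequent class
--     return best[0], sum(class_counts.values()) - best[1]
-- ===== Notes on version B (the rewrite author's own statement) =====
-- stated objective: simpler
-- what changed: Replaced the full stable reverse sort of the class-count items (plus a filtered re-summation for the error) by a single linear first-max scan with strict '>', computing the error as total minus the best count.
import Mathlib
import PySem

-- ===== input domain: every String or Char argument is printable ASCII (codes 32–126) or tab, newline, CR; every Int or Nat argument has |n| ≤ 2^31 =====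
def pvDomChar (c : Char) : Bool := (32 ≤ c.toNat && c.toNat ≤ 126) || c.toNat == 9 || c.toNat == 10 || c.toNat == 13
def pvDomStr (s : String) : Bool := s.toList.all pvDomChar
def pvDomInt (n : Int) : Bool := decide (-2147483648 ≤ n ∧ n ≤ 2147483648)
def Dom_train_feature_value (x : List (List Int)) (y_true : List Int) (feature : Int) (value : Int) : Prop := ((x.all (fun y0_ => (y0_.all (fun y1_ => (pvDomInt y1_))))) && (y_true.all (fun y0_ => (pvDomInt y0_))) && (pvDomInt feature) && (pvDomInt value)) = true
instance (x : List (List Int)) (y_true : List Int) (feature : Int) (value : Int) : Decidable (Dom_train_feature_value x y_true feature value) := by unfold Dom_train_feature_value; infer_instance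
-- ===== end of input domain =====

-- B replaces A's stable reverse sort + filtered re-sum by a linear first-max scan and `total - best`; objective: simpler.


-- ===== PORT A =====
-- class_counts: defaultdict(int) updated over zip(x, y_true); sample[feature] is pyGet? (none = IndexError, excluded by Pre_)
def pvCounts (x : List (List Int)) (y_true : List Int) (feature : Int) (value : Int) : PySem.Dict Int Int :=
  (x.zip y_true).foldl
    (fun d p => if PySem.List.pyGet? p.1 feature = some value then d.modify p.2 0 (· + 1) else d)
    PySem.Dict.empty

def train_feature_value (x : List (List Int)) (y_true : List Int) (feature : Int) (value : Int) : Int × Int :=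
  let class_counts := pvCounts x y_true feature value
  let sorted_class_counts := PySem.List.sorted class_counts.items (fun p => p.2) true
  -- sorted_class_counts[0][0]: IndexError on empty is excluded by Pre_; pyGetD is the total form
  let most_frequent_class := (PySem.List.pyGetD sorted_class_counts 0 ((0 : Int), (0 : Int))).1
  let error := ((class_counts.items.filter (fun p => p.1 != most_frequent_class)).map (fun p => p.2)).sum
  (most_frequent_class, error)

-- ===== PORT B =====
def train_feature_value_alt (x : List (List Int)) (y_true : List Int) (feature : Int) (value : Int) : Int × Int :=
  let class_counts := pvCounts x y_true feature value
  let items := class_counts.items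
  -- items[0]: IndexError on empty is excluded by Pre_; pyGetD is the total form
  let best0 := PySem.List.pyGetD items 0 ((0 : Int), (0 : Int))
  let best := (PySem.List.slice items (some 1) none).foldl
    (fun best it => if it.2 > best.2 then it else best) best0
  (best.1, class_counts.values.sum - best.2)

-- ===== PRECONDITION & SPEC =====
-- Pre_ admits exactly the inputs where A returns: every zipped sample has feature in range (else IndexError),
-- and at least one zipped sample matches value (else class_counts is empty and sorted_class_counts[0] raises IndexError).
def Pre_train_feature_value (x : List (List Int)) (y_true : List Int) (feature : Int) (value : Int) : Prop :=
  (∀ p ∈ x.zip y_true, PySem.Raise.InRange p.1.length feature) ∧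
  (∃ p ∈ x.zip y_true, PySem.List.pyGet? p.1 feature = some value)
instance (x : List (List Int)) (y_true : List Int) (feature : Int) (value : Int) : Decidable (Pre_train_feature_value x y_true feature value) := by unfold Pre_train_feature_value; infer_instance

def pvWitness_train_feature_value : List (List Int) × List Int × Int × Int := ([[1], [2], [1]], [4, 5, 4], 0, 1)

def Spec_train_feature_value (x : List (List Int)) (y_true : List Int) (feature : Int) (value : Int) (out : Int × Int) : Prop := out = train_feature_value_alt x y_true feature value
instance (x : List (List Int)) (y_true : List Int) (feature : Int) (value : Int) (out : Int × Int) : Decidable (Spec_train_feature_value x y_true feature value out) := by unfold Spec_train_feature_value; infer_instance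

-- ===== CLAIM (what is proved, stated in full; the proofs are below) =====
def Claim_equal_train_feature_value : Prop := ∀ (x : List (List Int)) (y_true : List Int) (feature : Int) (value : Int), Dom_train_feature_value x y_true feature value → Pre_train_feature_value x y_true feature value → Spec_train_feature_value x y_true feature value (train_feature_value x y_true feature value)

-- ===== LEMMAS AND PROOFS =====

-- B's scan abbreviation used only in the proofs
def pvScan (l : List (Int × Int)) (b : Int × Int) : Int × Int :=
  l.foldl (fun best it => if it.2 > best.2 then it else best) b

theorem pvScan_mem (l : List (Int × Int)) (b : Int × Int) : pvScan l b ∈ b :: l := by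
  induction l generalizing b with
  | nil => simp [pvScan]
  | cons h t ih =>
    simp only [pvScan, List.foldl_cons]
    have hmem := ih (if h.2 > b.2 then h else b)
    simp only [pvScan] at hmem
    rcases List.mem_cons.mp hmem with hm | hm
    · rw [hm]; split_ifs <;> simp
    · simp [hm]

-- head of the (stable, reverse) insertion sort over an accumulator whose head is maximal = B's first-max scan
theorem pvHead_foldl_insertBy (l : List (Int × Int)) :
    ∀ (m : Int × Int) (t : List (Int × Int)), (∀ y ∈ m :: t, y.2 ≤ m.2) →
    ∃ t', l.foldl (fun acc x => PySem.List.insertBy (fun a b => decide (b.2 < a.2)) x acc) (m :: t)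
            = pvScan l m :: t' ∧ (∀ y ∈ pvScan l m :: t', y.2 ≤ (pvScan l m).2) := by
  induction l with
  | nil => intro m t hmax; exact ⟨t, rfl, hmax⟩
  | cons h tl ih =>
    intro m t hmax
    simp only [List.foldl_cons, pvScan, PySem.List.insertBy]
    by_cases hgt : m.2 < h.2
    · simp only [hgt, decide_true, if_pos, gt_iff_lt]
      rcases ih h (m :: t) (by
        intro y hy
        rcases List.mem_cons.mp hy with hy | hy
        · simp [hy]
        · exact le_of_lt (lt_of_le_of_lt (hmax y hy) hgt)) with ⟨t', h1, h2⟩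
      exact ⟨t', h1, h2⟩
    · simp only [hgt, decide_false, gt_iff_lt, if_false]
      rcases ih m (PySem.List.insertBy (fun a b => decide (b.2 < a.2)) h t) (by
        intro y hy
        rcases List.mem_cons.mp hy with hy | hy
        · simp [hy]
        · rcases (PySem.List.mem_insertBy _ h y t).mp hy with hy | hy
          · subst hy; omega
          · exact hmax y (List.mem_cons_of_mem _ hy)) with ⟨t', h1, h2⟩
      exact ⟨t', h1, h2⟩

-- sum of the counts of the other keys = total − this key's count, given distinct keys
theorem pvSum_filter_ne (l : List (Int × Int)) (b : Int × Int)
    (hnd : (l.map Prod.fst).Nodup) (hb : b ∈ l) :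
    ((l.filter (fun p => p.1 != b.1)).map (fun p => p.2)).sum
      = (l.map (fun p => p.2)).sum - b.2 := by
  induction l with
  | nil => cases hb
  | cons h t ih =>
    simp only [List.map_cons, List.nodup_cons] at hnd
    rcases List.mem_cons.mp hb with hb | hb
    · subst hb
      have hfix : t.filter (fun p => p.1 != b.1) = t := by
        apply List.filter_eq_self.mpr
        intro p hp
        have : p.1 ≠ b.1 := by
          intro he; exact hnd.1 (he ▸ List.mem_map_of_mem hp)
        simpa using this
      have hfb : List.filter (fun p => p.1 != b.1) (b :: t) = t := by
        simp [hfix]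
      rw [hfb]
      simp only [List.map_cons, List.sum_cons]
      omega
    · have hne : h.1 ≠ b.1 := by
        intro he; exact hnd.1 (he ▸ List.mem_map_of_mem hb)
      have hfh : List.filter (fun p => p.1 != b.1) (h :: t) = h :: List.filter (fun p => p.1 != b.1) t := by
        simp [hne]
      rw [hfh]
      simp only [List.map_cons, List.sum_cons, ih hnd.2 hb]
      omega

-- the counting fold keeps the keys Nodup
theorem pvCounts_nodup_aux (l : List (List Int × Int)) (feature value : Int) :
    ∀ (d : PySem.Dict Int Int), d.keys.Nodup →
    (l.foldl (fun d p => if PySem.List.pyGet? p.1 feature = some value then d.modify p.2 0 (· + 1) else d) d).keys.Nodup := by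
  induction l with
  | nil => intro d hd; exact hd
  | cons h t ih =>
    intro d hd
    simp only [List.foldl_cons]
    split_ifs
    · exact ih _ (by rw [PySem.Dict.keys_modify]; exact PySem.Dict.nodup_keys_insert d _ _ hd)
    · exact ih _ hd

theorem pvCounts_nodup (x : List (List Int)) (y_true : List Int) (feature value : Int) :
    (pvCounts x y_true feature value).keys.Nodup :=
  pvCounts_nodup_aux _ _ _ _ PySem.Dict.nodup_keys_empty

-- containment is monotone through the fold, and a matching pair puts its class in
theorem pvCounts_contains_mono (l : List (List Int × Int)) (feature value : Int) :
    ∀ (d : PySem.Dict Int Int) (k : Int), d.contains k = true →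
    (l.foldl (fun d p => if PySem.List.pyGet? p.1 feature = some value then d.modify p.2 0 (· + 1) else d) d).contains k = true := by
  induction l with
  | nil => intro d k hk; exact hk
  | cons h t ih =>
    intro d k hk
    simp only [List.foldl_cons]
    split_ifs
    · exact ih _ _ (by rw [PySem.Dict.contains_modify]; simp [hk])
    · exact ih _ _ hk

theorem pvCounts_contains (l : List (List Int × Int)) (feature value : Int)
    (p : List Int × Int) (hp : p ∈ l) (hm : PySem.List.pyGet? p.1 feature = some value) :
    ∀ (d : PySem.Dict Int Int),
    (l.foldl (fun d p => if PySem.List.pyGet? p.1 feature = some value then d.modify p.2 0 (· + 1) else d) d).contains p.2 = true := by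
  induction l with
  | nil => cases hp
  | cons h t ih =>
    intro d
    simp only [List.foldl_cons]
    rcases List.mem_cons.mp hp with hp' | hp'
    · subst hp'
      rw [if_pos hm]
      exact pvCounts_contains_mono t feature value _ _ (by rw [PySem.Dict.contains_modify]; simp)
    · exact ih hp' _

theorem train_feature_value_eq_alt (x : List (List Int)) (y_true : List Int) (feature value : Int)
    (hpre : Pre_train_feature_value x y_true feature value) :
    train_feature_value x y_true feature value = train_feature_value_alt x y_true feature value := by
  obtain ⟨-, p, hp, hm⟩ := hpre
  have hcont : (pvCounts x y_true feature value).contains p.2 = true :=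
    pvCounts_contains _ feature value p hp hm PySem.Dict.empty
  have hnd : (pvCounts x y_true feature value).keys.Nodup := pvCounts_nodup x y_true feature value
  have hne : (pvCounts x y_true feature value).items ≠ [] := by
    intro h
    have := (PySem.Dict.contains_iff_mem_keys _ _).mp hcont
    simp only [PySem.Dict.keys, h, List.map_nil] at this
    cases this
  rcases hitems : (pvCounts x y_true feature value).items with _ | ⟨b, rest⟩
  · exact absurd hitems hne
  -- the sorted list starts with B's scan result
  have hsorted := pvHead_foldl_insertBy rest b [] (by intro y hy; simp at hy; simp [hy])
  rcases hsorted with ⟨t', hs, -⟩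
  have hbest_mem : pvScan rest b ∈ (pvCounts x y_true feature value).items := by
    rw [hitems]; exact pvScan_mem rest b
  have hndfst : ((pvCounts x y_true feature value).items.map Prod.fst).Nodup := hnd
  simp only [train_feature_value, train_feature_value_alt,
    PySem.List.sorted_rev_eq_foldl_insertBy, hitems, List.foldl_cons,
    PySem.List.insertBy, hs, PySem.List.pyGetD_zero_cons,
    PySem.List.slice_from (b :: rest) (by norm_num : (0:Int) ≤ 1)]
  have hdrop : List.drop (Int.toNat 1) (b :: rest) = rest := by simp
  rw [hdrop]
  have hscan : rest.foldl (fun best it => if it.2 > best.2 then it else best) b = pvScan rest b := rfl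
  rw [hscan]
  have hsum := pvSum_filter_ne ((pvCounts x y_true feature value).items) (pvScan rest b)
    hndfst hbest_mem
  rw [hitems] at hsum
  rw [hsum]
  have hvals : (pvCounts x y_true feature value).values = ((pvCounts x y_true feature value).items).map (fun p => p.2) := rfl
  rw [hvals, hitems]

-- ===== VERDICT (by name: the statement is the Claim_ definition above) =====
theorem train_feature_value_spec : Claim_equal_train_feature_value := by
  intro x y_true feature value _ hpre
  exact train_feature_value_eq_alt x y_true feature value hpre
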